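-- pv_equiv track=rewrite | github.com/titan-23/_old_Library | Graph/topological_sort.py | topological_sort_min
-- ===== SOURCE A (Python) =====
-- from typing import List
-- from heapq import heapify, heappush, heappop
--
-- def topological_sort_min(G: List[List[int]]) -> List[int]:
--   n = len(G)
--   d = [0] * n
--   for i in range(n):
--     for x in G[i]:
--       d[x] += 1
--   hq = [i for i,a in enumerate(d) if not a]
--   heapify(hq)
--   ret = []
--   while hq:
--     v = heappop(hq)
--     ret.append(v)
--     for x in G[v]:
--       d[x] -= 1
--       if d[x] == 0:
--         heappush(hq, x)
--   return ret
-- ===== SOURCE B (Python) =====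
-- from typing import List
--
-- def topological_sort_min(G: List[List[int]]) -> List[int]:
--   n = len(G)
--   d = [0] * n
--   for row in G:
--     for x in row:
--       d[x] += 1
--   pending = [i for i in range(n) if d[i] == 0]
--   out = []
--   while pending:
--     v = min(pending)
--     pending.remove(v)
--     out.append(v)
--     for x in G[v]:
--       d[x] -= 1
--       if d[x] == 0:
--         pending.append(x)
--   return out
-- ===== Notes on version B (the rewrite author's own statement) =====
-- stated objective: alternative
-- what changed: Drops the binary heap entirely: degrees are counted by iterating the rows directly, the initial frontier is a range scan of the degree array, and each round extracts the global minimum of a plain unsorted pending list with min()/remove() instead of maintaining heap order.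
import Mathlib
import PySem

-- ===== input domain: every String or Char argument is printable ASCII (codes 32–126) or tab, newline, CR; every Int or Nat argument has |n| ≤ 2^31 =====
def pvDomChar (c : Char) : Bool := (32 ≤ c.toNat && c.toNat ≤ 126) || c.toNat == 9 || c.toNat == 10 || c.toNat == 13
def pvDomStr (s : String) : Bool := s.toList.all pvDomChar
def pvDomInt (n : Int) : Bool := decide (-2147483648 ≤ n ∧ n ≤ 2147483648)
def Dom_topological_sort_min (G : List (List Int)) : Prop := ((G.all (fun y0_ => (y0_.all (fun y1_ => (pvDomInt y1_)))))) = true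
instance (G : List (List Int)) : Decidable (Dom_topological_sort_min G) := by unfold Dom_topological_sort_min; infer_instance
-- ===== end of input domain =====

-- B drops A's binary heap: it counts degrees from the rows directly, seeds the
-- frontier by a range scan, and extracts the minimum of a plain pending list each
-- round; same return value (neither Python mutates G).

-- ===== PORT A =====
-- heapq on a list of Ints is modelled by an ascending sorted list: heappush = ordered
-- insertion, heappop = take the head.  This is exact for the RETURN VALUE of A: heappop
-- returns the minimum of the heap's multiset, and Ints that compare equal are identical,
-- so the sequence of popped values is the same as CPython's.
def pvHeapPush : List Int → Int → List Int
  | [], x => [x]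
  | y :: t, x => if x < y then x :: y :: t else y :: pvHeapPush t x

-- while hq: v = heappop(hq); ret.append(v); for x in G[v]: d[x] -= 1; push x if d[x]==0.
-- Fuel guard only: under Pre_ each degree slot is enqueued at most once, so G.length
-- iterations are never exhausted while hq is nonempty.
def pvHeapLoop (G : List (List Int)) : Nat → List Int → List Int → List Int → List Int
  | 0, _, _, ret => ret
  | f + 1, hq, d, ret =>
    match hq with
    | [] => ret
    | v :: hq' =>
      let s := (PySem.List.pyGetD G v []).foldl
        (fun (s : List Int × List Int) x =>
          let d' := PySem.List.pySetD s.1 x (PySem.List.pyGetD s.1 x 0 - 1)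
          (d', if PySem.List.pyGetD d' x 0 == 0 then pvHeapPush s.2 x else s.2))
        (d, hq')
      pvHeapLoop G f s.2 s.1 (ret ++ [v])

def topological_sort_min (G : List (List Int)) : List Int :=
  let n : Int := PySem.List.len G
  let d := (PySem.List.pyRange 0 n 1).foldl
    (fun d i => (PySem.List.pyGetD G i []).foldl
      (fun d x => PySem.List.pySetD d x (PySem.List.pyGetD d x 0 + 1)) d)
    (List.replicate n.toNat (0 : Int))
  let hq := PySem.List.sorted (((PySem.List.enumerate d 0).filter (fun p => p.2 == 0)).map (·.1))
    (fun x => x) false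
  pvHeapLoop G n.toNat hq d []

-- ===== PORT B =====
-- 'for x in G[v]: d[x] -= 1; if d[x] == 0: pending.append(x)' as structural recursion
-- over the row, threading the degree array and the pending list.
def pvRelax : List Int → List Int → List Int → (List Int × List Int)
  | [], d, pending => (d, pending)
  | x :: xs, d, pending =>
    let d' := PySem.List.pySetD d x (PySem.List.pyGetD d x 0 - 1)
    if PySem.List.pyGetD d' x 0 == 0 then pvRelax xs d' (pending ++ [x])
    else pvRelax xs d' pending

-- while pending: v = min(pending); pending.remove(v); out.append(v); relax G[v].
-- Output built by cons; same fuel guard as A's loop (one emission per iteration).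
-- remove? is some since min(pending) is a member; the none arm is unreachable.
def pvEmit (G : List (List Int)) : Nat → List Int → List Int → List Int
  | 0, _, _ => []
  | f + 1, d, pending =>
    match PySem.List.min? pending (fun y => y) with
    | none => []
    | some v =>
      match PySem.List.remove? pending v with
      | none => []
      | some pending' =>
        let s := pvRelax (PySem.List.pyGetD G v []) d pending'
        v :: pvEmit G f s.1 s.2

def topological_sort_min_alt (G : List (List Int)) : List Int :=
  let n : Int := PySem.List.len G
  let d := G.foldl
    (fun d row => row.foldl
      (fun d x => PySem.List.pySetD d x (PySem.List.pyGetD d x 0 + 1)) d)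
    (List.replicate n.toNat (0 : Int))
  let pending := (PySem.List.pyRange 0 n 1).filter (fun i => PySem.List.pyGetD d i 0 == 0)
  pvEmit G n.toNat d pending

-- ===== PRECONDITION & SPEC =====
-- Pre_ is exactly the no-exception domain of A: every edge target x must satisfy
-- -n ≤ x < n (n = len(G)), otherwise `d[x] += 1` raises IndexError in both A and B.
def Pre_topological_sort_min (G : List (List Int)) : Prop :=
  ∀ row ∈ G, ∀ x ∈ row, -(G.length : Int) ≤ x ∧ x < (G.length : Int)
instance (G : List (List Int)) : Decidable (Pre_topological_sort_min G) := by
  unfold Pre_topological_sort_min; infer_instance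

def pvWitness_topological_sort_min : List (List Int) := [[1], [2], []]

def Spec_topological_sort_min (G : List (List Int)) (out : List Int) : Prop :=
  out = topological_sort_min_alt G
instance (G : List (List Int)) (out : List Int) : Decidable (Spec_topological_sort_min G out) := by
  unfold Spec_topological_sort_min; infer_instance

-- ===== CLAIM (what is proved, stated in full; the proofs are below) =====
def Claim_equal_topological_sort_min : Prop :=
  ∀ (G : List (List Int)), Dom_topological_sort_min G → Pre_topological_sort_min G →
    Spec_topological_sort_min G (topological_sort_min G)

-- ===== LEMMAS AND PROOFS =====

theorem pvHeapPush_perm (hq : List Int) (x : Int) : (pvHeapPush hq x).Perm (x :: hq) := by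
  induction hq with
  | nil => rfl
  | cons z t ih =>
    by_cases h : x < z
    · rw [pvHeapPush, if_pos h]
    · rw [pvHeapPush, if_neg h]
      exact (ih.cons z).trans (List.Perm.swap x z t)

theorem pvHeapPush_pairwise_le (hq : List Int) (x : Int) (hs : hq.Pairwise (· ≤ ·)) :
    (pvHeapPush hq x).Pairwise (· ≤ ·) := by
  induction hq with
  | nil => simp [pvHeapPush]
  | cons z t ih =>
    rcases List.pairwise_cons.mp hs with ⟨hz, ht⟩
    by_cases h : x < z
    · rw [pvHeapPush, if_pos h]
      refine List.pairwise_cons.mpr ⟨?_, hs⟩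
      intro y hy
      rcases List.mem_cons.mp hy with rfl | hyt
      · exact le_of_lt h
      · exact le_trans (le_of_lt h) (hz y hyt)
    · rw [pvHeapPush, if_neg h]
      refine List.pairwise_cons.mpr ⟨?_, ih ht⟩
      intro y hy
      rcases List.mem_cons.mp ((pvHeapPush_perm t x).mem_iff.mp hy) with rfl | hyt
      · exact not_lt.mp h
      · exact hz y hyt

-- the head of the sorted queue is what min() returns on any rearrangement of it
theorem pvMinHead (bag : List Int) (v : Int) (t : List Int)
    (hperm : bag.Perm (v :: t)) (hsort : (v :: t).Pairwise (· ≤ ·)) :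
    PySem.List.min? bag (fun y => y) = some v := by
  cases hmin : PySem.List.min? bag (fun y => y) with
  | none =>
    have : bag = [] := (PySem.List.min?_eq_none_iff bag _).mp hmin
    subst this
    exact absurd hperm.symm.eq_nil (by simp)
  | some m =>
    have hmem : m ∈ bag := PySem.List.min?_mem hmin
    have hismin : ∀ y ∈ bag, m ≤ y := fun y hy => PySem.List.min?_isMin hmin y hy
    have hvbag : v ∈ bag := hperm.mem_iff.mpr List.mem_cons_self
    have hmv : m ≤ v := hismin v hvbag
    have hvm : v ≤ m := by
      rcases List.mem_cons.mp (hperm.mem_iff.mp hmem) with rfl | hmt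
      · exact le_rfl
      · exact List.rel_of_pairwise_cons hsort hmt
    exact congrArg some (le_antisymm hmv hvm)

-- per-row lockstep: A's fold and B's pvRelax keep the same degree array and permuted queues
theorem pvFoldLock (row : List Int) :
    ∀ (d hq bag : List Int), hq.Perm bag → hq.Pairwise (· ≤ ·) →
    (row.foldl (fun (s : List Int × List Int) x =>
        let d' := PySem.List.pySetD s.1 x (PySem.List.pyGetD s.1 x 0 - 1)
        (d', if PySem.List.pyGetD d' x 0 == 0 then pvHeapPush s.2 x else s.2)) (d, hq)).1
      = (pvRelax row d bag).1
    ∧ (row.foldl (fun (s : List Int × List Int) x =>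
        let d' := PySem.List.pySetD s.1 x (PySem.List.pyGetD s.1 x 0 - 1)
        (d', if PySem.List.pyGetD d' x 0 == 0 then pvHeapPush s.2 x else s.2)) (d, hq)).2.Perm
      (pvRelax row d bag).2
    ∧ (row.foldl (fun (s : List Int × List Int) x =>
        let d' := PySem.List.pySetD s.1 x (PySem.List.pyGetD s.1 x 0 - 1)
        (d', if PySem.List.pyGetD d' x 0 == 0 then pvHeapPush s.2 x else s.2)) (d, hq)).2.Pairwise (· ≤ ·) := by
  induction row with
  | nil => intro d hq bag hperm hsort; exact ⟨rfl, hperm, hsort⟩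
  | cons x row' ih =>
    intro d hq bag hperm hsort
    simp only [List.foldl_cons, pvRelax]
    by_cases hc : PySem.List.pyGetD (PySem.List.pySetD d x (PySem.List.pyGetD d x 0 - 1)) x 0 == 0
    · have hperm' : (pvHeapPush hq x).Perm (bag ++ [x]) :=
        ((pvHeapPush_perm hq x).trans (hperm.cons x)).trans (List.perm_append_singleton x bag).symm
      have hsort' := pvHeapPush_pairwise_le hq x hsort
      simpa only [hc, if_pos] using ih _ _ _ (by simpa [hc] using hperm') (by simpa [hc] using hsort')
    · simpa only [hc, if_neg] using ih _ _ _ hperm hsort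

-- whole-loop lockstep: A's accumulator loop = accumulator ++ B's cons-built output
theorem pvLoopLock (G : List (List Int)) :
    ∀ (f : Nat) (d hq bag ret : List Int), hq.Perm bag → hq.Pairwise (· ≤ ·) →
      pvHeapLoop G f hq d ret = ret ++ pvEmit G f d bag := by
  intro f
  induction f with
  | zero => intro d hq bag ret _ _; simp [pvHeapLoop, pvEmit]
  | succ f ih =>
    intro d hq bag ret hperm hsort
    cases hhq : hq with
    | nil =>
      have hbag : bag = [] := (hhq ▸ hperm).symm.eq_nil
      rw [pvHeapLoop, pvEmit, hbag]
      have : PySem.List.min? ([] : List Int) (fun y => y) = none :=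
        (PySem.List.min?_eq_none_iff _ _).mpr rfl
      rw [this]; simp
    | cons v t =>
      subst hhq
      have hmin : PySem.List.min? bag (fun y => y) = some v := pvMinHead bag v t hperm.symm hsort
      have hvbag : v ∈ bag := hperm.mem_iff.mp List.mem_cons_self
      have hrem : PySem.List.remove? bag v = some (bag.erase v) :=
        PySem.List.remove?_eq_some_erase bag v hvbag
      have hperm' : t.Perm (bag.erase v) := by
        have h2 := hperm.erase v
        rwa [List.erase_cons_head] at h2
      have hsort' : t.Pairwise (· ≤ ·) := (List.pairwise_cons.mp hsort).2
      rw [pvHeapLoop, pvEmit]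
      simp only [hmin, hrem]
      obtain ⟨hd, hq2, hs2⟩ := pvFoldLock (PySem.List.pyGetD G v []) d t (bag.erase v) hperm' hsort'
      have h := ih ((PySem.List.pyGetD G v []).foldl
        (fun (s : List Int × List Int) x =>
          let d' := PySem.List.pySetD s.1 x (PySem.List.pyGetD s.1 x 0 - 1)
          (d', if PySem.List.pyGetD d' x 0 == 0 then pvHeapPush s.2 x else s.2))
        (d, t)).1 _ _ (ret ++ [v]) hq2 hs2
      rw [h, hd]
      simp

-- the two degree initialisations are the same array
theorem pvInitDeg (G : List (List Int)) :
    (PySem.List.pyRange 0 (PySem.List.len G) 1).foldl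
      (fun d i => (PySem.List.pyGetD G i []).foldl
        (fun d x => PySem.List.pySetD d x (PySem.List.pyGetD d x 0 + 1)) d)
      (List.replicate (PySem.List.len G).toNat (0 : Int))
    = G.foldl (fun d row => row.foldl
        (fun d x => PySem.List.pySetD d x (PySem.List.pyGetD d x 0 + 1)) d)
      (List.replicate (PySem.List.len G).toNat (0 : Int)) := by
  exact PySem.List.foldl_pyRange_zero_pyGetD G []
    (fun d row => row.foldl (fun d x => PySem.List.pySetD d x (PySem.List.pyGetD d x 0 + 1)) d) _

-- A's initial heap list equals B's range-scan frontier (both ascending)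
theorem pvInitFrontier (d : List Int) :
    (((PySem.List.enumerate d 0).filter (fun p => p.2 == 0)).map (·.1))
      = (PySem.List.pyRange 0 (d.length : Int) 1).filter
          (fun i => PySem.List.pyGetD d i 0 == 0) := by
  rw [PySem.List.enumerate_eq_map_pyRange d 0, List.filter_map, List.map_map]
  simp [Function.comp_def, PySem.List.len]

theorem topological_sort_min_witness :
    Dom_topological_sort_min pvWitness_topological_sort_min ∧
    Pre_topological_sort_min pvWitness_topological_sort_min := by
  constructor <;> decide

-- length of the degree array is n throughout the counting fold
theorem pvDegLen (G : List (List Int)) (init : List Int) :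
    (G.foldl (fun d row => row.foldl
        (fun d x => PySem.List.pySetD d x (PySem.List.pyGetD d x 0 + 1)) d) init).length
      = init.length := by
  induction G generalizing init with
  | nil => rfl
  | cons row G' ih =>
    rw [List.foldl_cons, ih]
    induction row generalizing init with
    | nil => rfl
    | cons x xs ihr => rw [List.foldl_cons, ihr]; exact PySem.List.length_pySetD _ _ _

-- ===== VERDICT (by name: the statement is the Claim_ definition above) =====
theorem topological_sort_min_spec : Claim_equal_topological_sort_min := by
  intro G _ _
  unfold Spec_topological_sort_min topological_sort_min topological_sort_min_alt
  simp only [pvInitDeg]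
  apply pvLoopLock
  · have hlen : ((G.foldl (fun d row => row.foldl
        (fun d x => PySem.List.pySetD d x (PySem.List.pyGetD d x 0 + 1)) d)
        (List.replicate (PySem.List.len G).toNat (0 : Int))).length : Int)
        = PySem.List.len G := by
      rw [pvDegLen]; simp [PySem.List.len]
    refine (PySem.List.sorted_perm _ (fun x => x) false).trans ?_
    rw [pvInitFrontier, hlen]
  · have h := PySem.List.sorted_pairwise
      (((PySem.List.enumerate (G.foldl (fun d row => row.foldl
        (fun d x => PySem.List.pySetD d x (PySem.List.pyGetD d x 0 + 1)) d)
        (List.replicate (PySem.List.len G).toNat (0 : Int))) 0).filter (fun p => p.2 == 0)).map (·.1))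
      (fun x => x)
    simpa using h
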